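-- pv_equiv track=rewrite | github.com/harmslab/epistasis | epistasis/mapping.py | mutations_to_coeffs
-- ===== SOURCE A (Python) =====
-- def mutations_to_coeffs(mutations):
--     """Write a dictionary that maps mutations dictionary to indices in dummy
--     variable matrix.
--
--     Parameters
--     ----------
--     mutations : dict
--         mapping each site to their accessible mutations alphabet.
--         mutations = {site_number : alphabet} If site does not mutate,
--         value should be None.
--
--     Returns
--     -------
--     mutations : dict
--         `mutations = { site_number : indices }`. If the site alphabet is
--         note included, the model will assume binary between wildtype and derived.
--
--     Example
--     -------
--     .. code-block:: python
--
--         mutations = {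
--             0: [indices],
--             1: [indices],
--             ...
--         }
--     """
--     param_map = dict()
--     n_sites = 1
--     for m in mutations:
--         if mutations[m] is None:
--             param_map[m] = None
--         else:
--             param_map[m] = list(range(n_sites, n_sites + len(mutations[m]) - 1))
--             n_sites += len(mutations[m])-1
--     return param_map
-- ===== SOURCE B (Python) =====
-- from itertools import accumulate
--
-- def mutations_to_coeffs(mutations):
--     incs = [0 if alph is None else len(alph) - 1 for alph in mutations.values()]
--     starts = list(accumulate(incs, initial=1))
--     return {m: (None if alph is None else list(range(s, s + inc)))
--             for (m, alph), s, inc in zip(mutations.items(), starts, incs)}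
-- ===== Notes on version B (the rewrite author's own statement) =====
-- stated objective: alternative
-- what changed: Replaces the single loop with a mutable running counter by a two-pass pipeline: per-site increments, prefix sums via itertools.accumulate for the start offsets, then a dict comprehension pairing each site with its range.
import Mathlib
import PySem

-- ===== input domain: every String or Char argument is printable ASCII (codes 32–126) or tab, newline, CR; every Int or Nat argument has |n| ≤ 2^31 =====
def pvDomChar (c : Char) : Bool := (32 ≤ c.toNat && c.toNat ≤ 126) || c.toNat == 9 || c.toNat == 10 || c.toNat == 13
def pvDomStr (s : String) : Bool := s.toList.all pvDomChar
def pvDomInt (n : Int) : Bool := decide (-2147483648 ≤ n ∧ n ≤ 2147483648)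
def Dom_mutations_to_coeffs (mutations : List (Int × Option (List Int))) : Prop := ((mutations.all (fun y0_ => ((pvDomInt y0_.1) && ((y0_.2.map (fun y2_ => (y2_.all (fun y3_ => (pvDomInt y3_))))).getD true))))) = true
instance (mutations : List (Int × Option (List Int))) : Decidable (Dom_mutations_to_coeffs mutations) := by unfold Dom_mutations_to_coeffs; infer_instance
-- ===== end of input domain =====

-- B replaces A's single loop with a mutable running counter by a two-pass pipeline
-- (per-site increments, prefix sums for start offsets, then one mapping pass); same cost.


-- ===== PORT A =====
-- A: one pass; running counter n_sites starts at 1, bumps by len(alphabet)-1 per mutating site.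
def mutations_to_coeffs (mutations : List (Int × Option (List Int))) : List (Int × Option (List Int)) :=
  let st := mutations.foldl
    (fun (acc : PySem.Dict Int (Option (List Int)) × Int) p =>
      match p.2 with
      | none => (acc.1.insert p.1 none, acc.2)
      | some a =>
          (acc.1.insert p.1 (some (PySem.List.pyRange acc.2 (acc.2 + a.length - 1) 1)),
           acc.2 + (a.length : Int) - 1))
    (PySem.Dict.empty, 1)
  st.1.items

-- ===== PORT B =====
-- B: increments list, then prefix sums (accumulate with initial 1) give each site's start,
-- then one pass builds the dict from (site, start, increment) triples.
def mutations_to_coeffs_alt (mutations : List (Int × Option (List Int))) : List (Int × Option (List Int)) :=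
  let incs : List Int := mutations.map (fun p => match p.2 with
    | none => (0 : Int)
    | some a => (a.length : Int) - 1)
  let starts : List Int := incs.scanl (· + ·) 1
  let triples := mutations.zip (starts.zip incs)
  (triples.foldl
    (fun (d : PySem.Dict Int (Option (List Int))) t =>
      match t.1.2 with
      | none => d.insert t.1.1 none
      | some _ => d.insert t.1.1 (some (PySem.List.pyRange t.2.1 (t.2.1 + t.2.2) 1)))
    PySem.Dict.empty).items

-- ===== PRECONDITION & SPEC =====
def Spec_mutations_to_coeffs (mutations : List (Int × Option (List Int))) (out : List (Int × Option (List Int))) : Prop := out = mutations_to_coeffs_alt mutations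
instance (mutations : List (Int × Option (List Int))) (out : List (Int × Option (List Int))) : Decidable (Spec_mutations_to_coeffs mutations out) := by unfold Spec_mutations_to_coeffs; infer_instance

-- ===== CLAIM (what is proved, stated in full; the proofs are below) =====
def Claim_equal_mutations_to_coeffs : Prop := ∀ (mutations : List (Int × Option (List Int))), Dom_mutations_to_coeffs mutations → Spec_mutations_to_coeffs mutations (mutations_to_coeffs mutations)

-- ===== LEMMAS AND PROOFS =====

-- Loop invariant: A's fold from any dict d and counter n equals B's triple-fold where the
-- prefix sums (scanl) start at n.
theorem mtc_loop_eq (ms : List (Int × Option (List Int)))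
    (d : PySem.Dict Int (Option (List Int))) (n : Int) :
    (ms.foldl
      (fun (acc : PySem.Dict Int (Option (List Int)) × Int) p =>
        match p.2 with
        | none => (acc.1.insert p.1 none, acc.2)
        | some a =>
            (acc.1.insert p.1 (some (PySem.List.pyRange acc.2 (acc.2 + a.length - 1) 1)),
             acc.2 + (a.length : Int) - 1))
      (d, n)).1
    =
    (ms.zip (((ms.map (fun p => match p.2 with
        | none => (0 : Int)
        | some a => (a.length : Int) - 1)).scanl (· + ·) n).zip
        (ms.map (fun p => match p.2 with
        | none => (0 : Int)
        | some a => (a.length : Int) - 1)))).foldl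
      (fun (acc : PySem.Dict Int (Option (List Int))) t =>
        match t.1.2 with
        | none => acc.insert t.1.1 none
        | some _ => acc.insert t.1.1 (some (PySem.List.pyRange t.2.1 (t.2.1 + t.2.2) 1)))
      d := by
  induction ms generalizing d n with
  | nil => simp
  | cons p ms ih =>
    obtain ⟨m, alph⟩ := p
    cases alph with
    | none =>
        simp only [List.map_cons, List.scanl_cons, List.zip_cons_cons, List.foldl_cons]
        rw [show n + 0 = n by ring]
        exact ih _ n
    | some a =>
        simp only [List.map_cons, List.scanl_cons, List.zip_cons_cons, List.foldl_cons]
        rw [show n + ((a.length : Int) - 1) = n + (a.length : Int) - 1 by ring]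
        exact ih _ _

-- ===== VERDICT (by name: the statement is the Claim_ definition above) =====
theorem mutations_to_coeffs_spec : Claim_equal_mutations_to_coeffs := by
  intro mutations _
  show mutations_to_coeffs mutations = mutations_to_coeffs_alt mutations
  unfold mutations_to_coeffs mutations_to_coeffs_alt
  exact congrArg PySem.Dict.items (mtc_loop_eq mutations PySem.Dict.empty 1)
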